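-- pv_equiv track=rewrite | github.com/Thomas-Rammos/- | krwsky.py | schedule_edges
-- ===== SOURCE A (Python) =====
-- def schedule_edges(edges, neighbors, edges_info):
--     """
--     Υλοποίηση του LF scheduling, χρησιμοποιώντας neighbors.
--     neighbors[node] = [(neighbor, edge_id, weight)]
--     """
--     start_times = {}
--
--     for (edge_id, node1, node2, weight) in edges:
--         scheduled_adj_times = []
--         for node in (node1, node2):
--             for (nbr, nbr_edge_id, nbr_weight) in neighbors[node]:
--                 if nbr_edge_id in start_times:
--                     nbr_start = start_times[nbr_edge_id]
--                     scheduled_adj_times.append((nbr_start, nbr_weight))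
--
--         scheduled_adj_times.sort(key=lambda x: x[0])
--         term = 0
--         for (t_e_sj, l_e_sj) in scheduled_adj_times:
--             if term + weight <= t_e_sj:
--                 break
--             else:
--                 term = max(term, t_e_sj + l_e_sj)
--
--         start_times[edge_id] = term
--
--     return start_times
-- ===== SOURCE B (Python) =====
-- def schedule_edges(edges, neighbors, edges_info):
--     """Interval-merge reformulation: collect busy intervals of scheduled
--     adjacent edges, merge overlapping blocks, then gap-scan for the
--     earliest feasible start."""
--     start_times = {}
--     for edge_id, node1, node2, weight in edges:
--         pairs = [(start_times[nid], nw)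
--                  for (_nbr, nid, nw) in neighbors[node1] + neighbors[node2]
--                  if nid in start_times]
--         pairs.sort(key=lambda x: x[0])
--         # merge into disjoint maximal busy blocks
--         blocks = []
--         for t, l in pairs:
--             if blocks and t <= blocks[-1][1]:
--                 blocks[-1] = (blocks[-1][0], max(blocks[-1][1], t + l))
--             else:
--                 blocks.append((t, t + l))
--         # walk the gaps
--         start = 0
--         for s, e in blocks:
--             if start + weight <= s:
--                 break
--             start = max(start, e)
--         start_times[edge_id] = start
--     return start_times
-- ===== Notes on version B (the rewrite author's own statement) =====
-- stated objective: alternative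
-- what changed: Per edge, B replaces A's single accumulator sweep over the sorted (start, weight) pairs by two distinct passes: it first merges the sorted busy intervals into disjoint maximal blocks, then walks the gaps between blocks with a candidate start; Pre_ excludes inputs where an edge endpoint is missing from neighbors, on which A raises KeyError.
import Mathlib
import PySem

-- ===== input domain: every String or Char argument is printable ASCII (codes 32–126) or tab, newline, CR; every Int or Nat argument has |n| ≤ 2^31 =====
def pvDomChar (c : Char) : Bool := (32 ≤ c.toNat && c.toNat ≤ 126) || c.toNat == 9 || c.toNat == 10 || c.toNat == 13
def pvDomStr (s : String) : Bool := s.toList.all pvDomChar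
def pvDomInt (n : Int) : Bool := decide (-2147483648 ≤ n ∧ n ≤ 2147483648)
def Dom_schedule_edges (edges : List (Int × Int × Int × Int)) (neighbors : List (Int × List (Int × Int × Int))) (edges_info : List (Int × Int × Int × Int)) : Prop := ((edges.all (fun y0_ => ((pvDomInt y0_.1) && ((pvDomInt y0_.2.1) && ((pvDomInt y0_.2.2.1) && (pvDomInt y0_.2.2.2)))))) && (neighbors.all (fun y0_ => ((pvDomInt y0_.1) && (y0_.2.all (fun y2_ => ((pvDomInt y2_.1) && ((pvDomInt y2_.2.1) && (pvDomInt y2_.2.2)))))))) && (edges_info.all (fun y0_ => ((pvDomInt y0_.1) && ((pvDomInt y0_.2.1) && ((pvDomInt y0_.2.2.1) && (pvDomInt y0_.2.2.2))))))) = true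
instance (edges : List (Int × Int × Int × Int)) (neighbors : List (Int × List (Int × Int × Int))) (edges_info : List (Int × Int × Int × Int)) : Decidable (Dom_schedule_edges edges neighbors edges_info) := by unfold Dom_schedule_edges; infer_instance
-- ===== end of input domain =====

-- B recomputes each edge's start by merging the sorted busy intervals into disjoint blocks
-- and gap-scanning them, instead of A's single max-accumulator sweep (alternative decomposition, same cost).


-- ===== PORT A =====
-- inner 'for node in (node1, node2): for … in neighbors[node]: if nbr_edge_id in start_times: append'
def pvGatherA (d : PySem.Dict Int Int) (nbrs : List (Int × Int × Int)) (acc : List (Int × Int)) : List (Int × Int) :=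
  nbrs.foldl (fun a x => if d.contains x.2.1 then a ++ [((d.get? x.2.1).getD 0, x.2.2)] else a) acc

-- 'term = 0; for (t,l) in sorted list: if term + weight <= t: break else term = max(term, t+l)'
def pvTermA (w : Int) : Int → List (Int × Int) → Int
  | term, [] => term
  | term, (t, l) :: r => if term + w ≤ t then term else pvTermA w (max term (t + l)) r

def pvStepA (neighbors : List (Int × List (Int × Int × Int))) (d : PySem.Dict Int Int) (e : Int × Int × Int × Int) : PySem.Dict Int Int :=
  d.insert e.1 (pvTermA e.2.2.2 0 (PySem.List.sorted (pvGatherA d ((neighbors.lookup e.2.2.1).getD []) (pvGatherA d ((neighbors.lookup e.2.1).getD []) [])) (fun x => x.1) false))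

def schedule_edges (edges : List (Int × Int × Int × Int)) (neighbors : List (Int × List (Int × Int × Int))) (edges_info : List (Int × Int × Int × Int)) : List (Int × Int) :=
  (edges.foldl (pvStepA neighbors) PySem.Dict.empty).items

-- ===== PORT B =====
-- the comprehension over neighbors[node1] + neighbors[node2]
def pvGatherB (d : PySem.Dict Int Int) (nbrs : List (Int × Int × Int)) : List (Int × Int) :=
  nbrs.filterMap (fun x => (d.get? x.2.1).map (fun t => (t, x.2.2)))

-- the block-merge loop (blocks[-1] carried as (ps, pe))
def pvMergeGo : Int → Int → List (Int × Int) → List (Int × Int)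
  | ps, pe, [] => [(ps, pe)]
  | ps, pe, (t, l) :: r => if t ≤ pe then pvMergeGo ps (max pe (t + l)) r else (ps, pe) :: pvMergeGo t (t + l) r

def pvMerge : List (Int × Int) → List (Int × Int)
  | [] => []
  | (t, l) :: r => pvMergeGo t (t + l) r

-- 'start = 0; for (s,e) in blocks: if start + weight <= s: break; start = max(start, e)'
def pvGapScan (w : Int) : Int → List (Int × Int) → Int
  | c, [] => c
  | c, (s, e) :: r => if c + w ≤ s then c else pvGapScan w (max c e) r

def pvStepB (neighbors : List (Int × List (Int × Int × Int))) (d : PySem.Dict Int Int) (e : Int × Int × Int × Int) : PySem.Dict Int Int :=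
  d.insert e.1 (pvGapScan e.2.2.2 0 (pvMerge (PySem.List.sorted (pvGatherB d ((neighbors.lookup e.2.1).getD [] ++ (neighbors.lookup e.2.2.1).getD [])) (fun x => x.1) false)))

def schedule_edges_alt (edges : List (Int × Int × Int × Int)) (neighbors : List (Int × List (Int × Int × Int))) (edges_info : List (Int × Int × Int × Int)) : List (Int × Int) :=
  (edges.foldl (pvStepB neighbors) PySem.Dict.empty).items

-- ===== PRECONDITION & SPEC =====
-- Pre_ excludes exactly the inputs where some edge endpoint is not a key of neighbors, on which A raises KeyError.
def Pre_schedule_edges (edges : List (Int × Int × Int × Int)) (neighbors : List (Int × List (Int × Int × Int))) (edges_info : List (Int × Int × Int × Int)) : Prop :=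
  (edges.all (fun e => (neighbors.lookup e.2.1).isSome && (neighbors.lookup e.2.2.1).isSome)) = true
instance (edges : List (Int × Int × Int × Int)) (neighbors : List (Int × List (Int × Int × Int))) (edges_info : List (Int × Int × Int × Int)) : Decidable (Pre_schedule_edges edges neighbors edges_info) := by unfold Pre_schedule_edges; infer_instance

def pvWitness_schedule_edges : (List (Int × Int × Int × Int)) × (List (Int × List (Int × Int × Int))) × (List (Int × Int × Int × Int)) :=
  ([(0, 1, 2, 3), (5, 2, 2, 2)], [(1, [(2, 5, 2)]), (2, [(1, 0, 3)])], [])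

def Spec_schedule_edges (edges : List (Int × Int × Int × Int)) (neighbors : List (Int × List (Int × Int × Int))) (edges_info : List (Int × Int × Int × Int)) (out : List (Int × Int)) : Prop := out = schedule_edges_alt edges neighbors edges_info
instance (edges : List (Int × Int × Int × Int)) (neighbors : List (Int × List (Int × Int × Int))) (edges_info : List (Int × Int × Int × Int)) (out : List (Int × Int)) : Decidable (Spec_schedule_edges edges neighbors edges_info out) := by unfold Spec_schedule_edges; infer_instance

-- ===== CLAIM (what is proved, stated in full; the proofs are below) =====
def Claim_equal_schedule_edges : Prop := ∀ (edges : List (Int × Int × Int × Int)) (neighbors : List (Int × List (Int × Int × Int))) (edges_info : List (Int × Int × Int × Int)), Dom_schedule_edges edges neighbors edges_info → Pre_schedule_edges edges neighbors edges_info → Spec_schedule_edges edges neighbors edges_info (schedule_edges edges neighbors edges_info)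

-- ===== LEMMAS AND PROOFS =====

-- A's append-gather equals acc ++ B's filterMap-gather
lemma gather_eq (d : PySem.Dict Int Int) : ∀ (l : List (Int × Int × Int)) (acc : List (Int × Int)),
    pvGatherA d l acc = acc ++ pvGatherB d l := by
  intro l
  induction l with
  | nil => intro acc; simp [pvGatherA, pvGatherB]
  | cons x r ih =>
    intro acc
    simp only [pvGatherA, pvGatherB, List.foldl_cons, List.filterMap_cons]
    rw [PySem.Dict.contains_eq_isSome_get?]
    cases h : d.get? x.2.1 with
    | none => simpa [h, pvGatherA, pvGatherB] using ih acc
    | some t =>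
      simp only [Option.isSome_some, if_true, Option.getD_some, Option.map_some]
      simpa [pvGatherA, pvGatherB] using ih (acc ++ [(t, x.2.2)])

-- the merged list starts at the first block's start
lemma mergeGo_head : ∀ (r : List (Int × Int)) (ps pe : Int), ∃ e' tl, pvMergeGo ps pe r = (ps, e') :: tl := by
  intro r
  induction r with
  | nil => intro ps pe; exact ⟨pe, [], rfl⟩
  | cons x r ih =>
    intro ps pe
    obtain ⟨t, l⟩ := x
    by_cases h : t ≤ pe
    · simpa [pvMergeGo, h] using ih ps (max pe (t + l))
    · exact ⟨pe, pvMergeGo t (t + l) r, by simp [pvMergeGo, h]⟩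

-- for positive weight, gap-scanning the merged blocks is A's sweep
lemma gap_merge (w : Int) (hw : 0 < w) : ∀ (r : List (Int × Int)) (ps pe c : Int),
    pvGapScan w c (pvMergeGo ps pe r) = if c + w ≤ ps then c else pvTermA w (max c pe) r := by
  intro r
  induction r with
  | nil => intro ps pe c; simp [pvMergeGo, pvGapScan, pvTermA]
  | cons x r ih =>
    intro ps pe c
    obtain ⟨t, l⟩ := x
    by_cases h : t ≤ pe
    · rw [show pvMergeGo ps pe ((t, l) :: r) = pvMergeGo ps (max pe (t + l)) r by simp [pvMergeGo, h], ih]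
      by_cases hc : c + w ≤ ps
      · simp [hc]
      · have hbig : ¬ (max c pe + w ≤ t) := by
          have : pe < pe + w := by omega
          have : pe < max c pe + w := lt_of_lt_of_le this (by omega)
          omega
        simp only [hc, if_false, pvTermA, hbig, if_false]
        congr 1
        omega
    · rw [show pvMergeGo ps pe ((t, l) :: r) = (ps, pe) :: pvMergeGo t (t + l) r by simp [pvMergeGo, h]]
      by_cases hc : c + w ≤ ps
      · simp [pvGapScan, hc]
      · simp only [pvGapScan, hc, if_false, ih, pvTermA]

-- A's sweep never decreases its accumulator
lemma termA_ge (w : Int) : ∀ (r : List (Int × Int)) (c : Int), c ≤ pvTermA w c r := by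
  intro r
  induction r with
  | nil => intro c; simp [pvTermA]
  | cons x r ih =>
    intro c
    obtain ⟨t, l⟩ := x
    by_cases h : c + w ≤ t
    · simp [pvTermA, h]
    · simp only [pvTermA, h, if_false]
      exact le_trans (le_max_left _ _) (ih _)

-- per-edge equality: A's sweep = B's merge-then-gap-scan, given nonnegative starts
lemma per_edge (w : Int) (ps : List (Int × Int)) (hpos : ∀ p ∈ ps, 0 ≤ p.1) :
    pvTermA w 0 ps = pvGapScan w 0 (pvMerge ps) := by
  cases ps with
  | nil => simp [pvTermA, pvMerge, pvGapScan]
  | cons x r =>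
    obtain ⟨t, l⟩ := x
    rcases lt_or_ge 0 w with hw | hw
    · rw [show pvMerge ((t, l) :: r) = pvMergeGo t (t + l) r from rfl, gap_merge w hw]
      simp [pvTermA]
    · have ht : 0 ≤ t := hpos (t, l) (by simp)
      have hbrk : (0 : Int) + w ≤ t := by omega
      obtain ⟨e', tl, hm⟩ := mergeGo_head r t (t + l)
      rw [show pvMerge ((t, l) :: r) = pvMergeGo t (t + l) r from rfl, hm]
      simp [pvTermA, pvGapScan, show w ≤ t by omega]

-- a value looked up in d is one of d's values
lemma get?_mem_values (d : PySem.Dict Int Int) (k v : Int) (h : d.get? k = some v) : v ∈ d.values := by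
  have := PySem.Dict.mem_items_of_get?_eq_some d h
  simp only [PySem.Dict.values]
  exact List.mem_map.mpr ⟨(k, v), this, rfl⟩

-- the two steps agree on dicts with nonnegative values
lemma step_eq (neighbors : List (Int × List (Int × Int × Int))) (d : PySem.Dict Int Int)
    (hd : ∀ v ∈ d.values, 0 ≤ v) (e : Int × Int × Int × Int) :
    pvStepA neighbors d e = pvStepB neighbors d e := by
  unfold pvStepA pvStepB
  rw [gather_eq, gather_eq, List.nil_append, show pvGatherB d ((List.lookup e.2.1 neighbors).getD []) ++ pvGatherB d ((List.lookup e.2.2.1 neighbors).getD []) = pvGatherB d ((List.lookup e.2.1 neighbors).getD [] ++ (List.lookup e.2.2.1 neighbors).getD []) by simp [pvGatherB]]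
  congr 1
  apply per_edge
  intro p hp
  rw [PySem.List.mem_sorted] at hp
  obtain ⟨x, _, hx⟩ := List.mem_filterMap.mp hp
  cases hg : d.get? x.2.1 with
  | none => simp [hg] at hx
  | some t =>
    simp only [hg, Option.map_some, Option.some.injEq] at hx
    have := hd t (get?_mem_values d x.2.1 t hg)
    rw [← hx]
    exact this

-- the step preserves nonnegativity of the stored values
lemma step_nonneg (neighbors : List (Int × List (Int × Int × Int))) (d : PySem.Dict Int Int)
    (hd : ∀ v ∈ d.values, 0 ≤ v) (e : Int × Int × Int × Int) :
    ∀ v ∈ (pvStepA neighbors d e).values, 0 ≤ v := by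
  intro v hv
  unfold pvStepA at hv
  rcases PySem.Dict.mem_values_insert d _ _ _ hv with h | h
  · rw [h]; exact termA_ge _ _ 0
  · exact hd v h

lemma fold_eq (neighbors : List (Int × List (Int × Int × Int))) :
    ∀ (edges : List (Int × Int × Int × Int)) (d : PySem.Dict Int Int), (∀ v ∈ d.values, 0 ≤ v) →
      edges.foldl (pvStepA neighbors) d = edges.foldl (pvStepB neighbors) d := by
  intro edges
  induction edges with
  | nil => intro d _; rfl
  | cons e r ih =>
    intro d hd
    simp only [List.foldl_cons]
    rw [← step_eq neighbors d hd e]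
    exact ih _ (step_nonneg neighbors d hd e)

-- ===== VERDICT (by name: the statement is the Claim_ definition above) =====
theorem schedule_edges_spec : Claim_equal_schedule_edges := by
  intro edges neighbors edges_info _ _
  unfold Spec_schedule_edges schedule_edges schedule_edges_alt
  rw [fold_eq neighbors edges PySem.Dict.empty (by simp [PySem.Dict.values, PySem.Dict.empty])]
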